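-- pv_equiv track=rewrite | github.com/benjaminverbeek/Project-Statistical-ML | figures.py | labelmaker
-- ===== SOURCE A (Python) =====
-- def allCombos(lst):
--     """Takes in a list of lists and returns a list of all combinations of list elements."""
--     combos = []
--     for i in range(2**len(lst)):
--         a=i
--         params = []
--         for j in range(len(lst)):
--             if a%2 == 1:
--                 params += lst[j]
--             a = a//2
--         combos.append(params)
--     return combos
--
-- def labelmaker(testParams, modelNames, yes = False):
--     if yes:
--         label = ["All Male"]
--         for i in range(len(allCombos(testParams))):
--             label.extend(modelNames)
--         return label
--     else:
--         return None
-- ===== SOURCE B (Python) =====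
-- def labelmaker(testParams, modelNames, yes = False):
--     if yes:
--         return ["All Male"] + list(modelNames) * (2 ** len(testParams))
--     return None
-- ===== Notes on version B (the rewrite author's own statement) =====
-- stated objective: simpler
-- what changed: B never builds the 2^n combination lists of allCombos: it uses the repeat count 2**len(testParams) directly and produces the label list by list repetition instead of a loop of extends.
import Mathlib
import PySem

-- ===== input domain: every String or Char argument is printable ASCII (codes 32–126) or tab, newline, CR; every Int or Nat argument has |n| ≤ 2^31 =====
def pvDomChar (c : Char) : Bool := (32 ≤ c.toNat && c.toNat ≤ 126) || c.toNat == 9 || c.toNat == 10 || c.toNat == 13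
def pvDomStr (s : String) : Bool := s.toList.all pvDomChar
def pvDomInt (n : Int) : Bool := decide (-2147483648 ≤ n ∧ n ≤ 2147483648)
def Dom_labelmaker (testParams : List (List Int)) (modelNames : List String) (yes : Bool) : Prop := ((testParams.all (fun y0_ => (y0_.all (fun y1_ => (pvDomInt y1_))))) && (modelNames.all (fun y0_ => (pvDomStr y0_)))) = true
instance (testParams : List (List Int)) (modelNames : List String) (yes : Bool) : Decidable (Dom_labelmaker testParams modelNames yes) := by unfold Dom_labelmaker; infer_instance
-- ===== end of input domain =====

-- B skips building the 2^n combination lists of allCombos: it uses the repeat count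
-- 2**len(testParams) directly and produces the labels by list repetition (objective: simpler).

-- ===== PORT A =====
-- literal port of allCombos: builds every combination before labelmaker counts them
def allCombosPort (lst : List (List Int)) : List (List Int) :=
  (PySem.List.pyRange 0 ((2 : Int) ^ lst.length) 1).foldl
    (fun combos i =>
      -- inner loop state: (a, params); lst[j] is always in range (j ∈ range(len(lst)))
      let st := (PySem.List.pyRange 0 (lst.length : Int) 1).foldl
        (fun (st : Int × List Int) j =>
          let params := if PySem.Int.mod st.1 2 = 1 then st.2 ++ PySem.List.pyGetD lst j [] else st.2
          (PySem.Int.floordiv st.1 2, params)) (i, [])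
      combos ++ [st.2]) []

def labelmaker (testParams : List (List Int)) (modelNames : List String) (yes : Bool) : Option (List String) :=
  if yes then
    some ((PySem.List.pyRange 0 ((allCombosPort testParams).length : Int) 1).foldl
      (fun label _ => label ++ modelNames) ["All Male"])
  else none

-- ===== PORT B =====
def labelmaker_alt (testParams : List (List Int)) (modelNames : List String) (yes : Bool) : Option (List String) :=
  if yes then
    some (["All Male"] ++ (List.replicate (2 ^ testParams.length) modelNames).flatten)
  else none

-- ===== PRECONDITION & SPEC =====
def Spec_labelmaker (testParams : List (List Int)) (modelNames : List String) (yes : Bool) (out : Option (List String)) : Prop := out = labelmaker_alt testParams modelNames yes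
instance (testParams : List (List Int)) (modelNames : List String) (yes : Bool) (out : Option (List String)) : Decidable (Spec_labelmaker testParams modelNames yes out) := by unfold Spec_labelmaker; infer_instance

-- ===== CLAIM (what is proved, stated in full; the proofs are below) =====
def Claim_equal_labelmaker : Prop := ∀ (testParams : List (List Int)) (modelNames : List String) (yes : Bool), Dom_labelmaker testParams modelNames yes → Spec_labelmaker testParams modelNames yes (labelmaker testParams modelNames yes)

-- ===== LEMMAS AND PROOFS =====

-- a foldl that appends one element per step grows by the list length
theorem pv_foldl_snoc_length {α : Type} (g : List (List Int) → α → List Int) :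
    ∀ (l : List α) (init : List (List Int)),
      (l.foldl (fun c i => c ++ [g c i]) init).length = init.length + l.length := by
  intro l
  induction l with
  | nil => intro init; simp
  | cons x xs ih =>
      intro init
      simp [List.foldl_cons, ih]
      omega

theorem pv_allCombos_length (lst : List (List Int)) :
    (allCombosPort lst).length = 2 ^ lst.length := by
  unfold allCombosPort
  rw [pv_foldl_snoc_length (fun c i =>
    ((PySem.List.pyRange 0 (lst.length : Int) 1).foldl
      (fun (st : Int × List Int) j =>
        let params := if PySem.Int.mod st.1 2 = 1 then st.2 ++ PySem.List.pyGetD lst j [] else st.2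
        (PySem.Int.floordiv st.1 2, params)) (i, [])).2)]
  simp [PySem.List.length_pyRange_one]
  rw [show ((2:Int) ^ lst.length) = ((2 ^ lst.length : Nat) : Int) by push_cast; ring]
  exact Int.toNat_natCast _

-- extending the label list once per element of l is repeating modelNames l.length times
theorem pv_foldl_const_append (m : List String) :
    ∀ (l : List Int) (init : List String),
      l.foldl (fun lab _ => lab ++ m) init = init ++ (List.replicate l.length m).flatten := by
  intro l
  induction l with
  | nil => intro init; simp
  | cons x xs ih =>
      intro init
      simp [List.foldl_cons, ih, List.replicate_succ, List.append_assoc]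

-- ===== VERDICT (by name: the statement is the Claim_ definition above) =====
theorem labelmaker_spec : Claim_equal_labelmaker := by
  intro testParams modelNames yes _
  unfold Spec_labelmaker labelmaker labelmaker_alt
  cases yes with
  | false => rfl
  | true =>
      simp only [if_true]
      rw [pv_foldl_const_append modelNames]
      simp only [PySem.List.length_pyRange_one, pv_allCombos_length, Int.sub_zero]
      rw [Int.toNat_natCast]
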